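-- pv_equiv track=rewrite | github.com/kelvincjr/myRepo | theta-0.24.1/theta/modeling/seqlabel/predict.py | adjust_test_data
-- ===== SOURCE A (Python) =====
-- def adjust_test_data(test_data, seg_len, seg_backoff):
--     tmp_data = {}
--     for ID, text_in, c_in in test_data:
--         if ID not in tmp_data:
--             tmp_data[ID] = []
--         tmp_data[ID].append((text_in, c_in))
--     new_test_data = []
--     for ID, X in tmp_data.items():
--         X = [(ID, text_in, c_in, (seg_len - seg_backoff) * i)
--              for i, (text_in, c_in) in enumerate(X)]
--         new_test_data += X
--
--     return new_test_data
-- ===== SOURCE B (Python) =====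
-- def adjust_test_data(test_data, seg_len, seg_backoff):
--     # distinct IDs in first-appearance order, then one full scan per ID
--     ids = list(dict.fromkeys(ID for ID, _, _ in test_data))
--     step = seg_len - seg_backoff
--     new_test_data = []
--     for ID in ids:
--         group = [(text_in, c_in) for ID2, text_in, c_in in test_data if ID2 == ID]
--         for i, (text_in, c_in) in enumerate(group):
--             new_test_data.append((ID, text_in, c_in, step * i))
--     return new_test_data
-- ===== Notes on version B (the rewrite author's own statement) =====
-- stated objective: alternative
-- what changed: Replaces A's build-a-dict-of-groups-then-flatten strategy by computing the distinct IDs in first-appearance order once (dict.fromkeys) and then, per ID, collecting its rows by a fresh filter scan of test_data with enumerate assigning offsets.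
import Mathlib
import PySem

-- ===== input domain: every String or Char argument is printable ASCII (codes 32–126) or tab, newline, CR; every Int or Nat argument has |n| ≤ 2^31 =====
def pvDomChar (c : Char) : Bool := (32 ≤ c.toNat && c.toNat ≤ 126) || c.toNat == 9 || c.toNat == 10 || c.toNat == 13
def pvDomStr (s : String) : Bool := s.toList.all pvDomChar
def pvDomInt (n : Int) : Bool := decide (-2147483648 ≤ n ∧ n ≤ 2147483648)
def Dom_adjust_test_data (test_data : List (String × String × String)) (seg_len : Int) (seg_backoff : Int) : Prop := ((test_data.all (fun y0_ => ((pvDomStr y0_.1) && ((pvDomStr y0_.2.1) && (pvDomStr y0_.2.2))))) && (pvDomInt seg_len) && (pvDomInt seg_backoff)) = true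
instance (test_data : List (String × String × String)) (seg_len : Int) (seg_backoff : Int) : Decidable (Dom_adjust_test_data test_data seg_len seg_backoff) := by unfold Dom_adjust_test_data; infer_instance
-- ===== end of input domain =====

-- B replaces A's build-a-dict-then-flatten grouping by a dedup of the IDs followed by one
-- filter scan per distinct ID (alternative decomposition, same result).


-- ===== PORT A =====
-- the grouping loop: 'if ID not in tmp_data: tmp_data[ID] = []; tmp_data[ID].append(...)'
-- is exactly tmp_data[ID] = tmp_data.get(ID, []) + [(text_in, c_in)], i.e. Dict.modify
def adjust_test_data (test_data : List (String × String × String)) (seg_len : Int) (seg_backoff : Int) : List (String × String × String × Int) :=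
  let tmp_data : PySem.Dict String (List (String × String)) :=
    test_data.foldl (fun d e => d.modify e.1 [] (· ++ [(e.2.1, e.2.2)])) PySem.Dict.empty
  tmp_data.items.foldl (fun acc kv =>
    acc ++ (PySem.List.enumerate kv.2 0).map
      (fun p => (kv.1, p.2.1, p.2.2, (seg_len - seg_backoff) * p.1))) []

-- ===== PORT B =====
def adjust_test_data_alt (test_data : List (String × String × String)) (seg_len : Int) (seg_backoff : Int) : List (String × String × String × Int) :=
  let ids := PySem.List.dedup (test_data.map (·.1))
  let step := seg_len - seg_backoff
  ids.flatMap (fun id =>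
    (PySem.List.enumerate ((test_data.filter (fun e => e.1 == id)).map (fun e => (e.2.1, e.2.2))) 0).map
      (fun p => (id, p.2.1, p.2.2, step * p.1)))

-- ===== PRECONDITION & SPEC =====
def Spec_adjust_test_data (test_data : List (String × String × String)) (seg_len : Int) (seg_backoff : Int) (out : List (String × String × String × Int)) : Prop := out = adjust_test_data_alt test_data seg_len seg_backoff
instance (test_data : List (String × String × String)) (seg_len : Int) (seg_backoff : Int) (out : List (String × String × String × Int)) : Decidable (Spec_adjust_test_data test_data seg_len seg_backoff out) := by unfold Spec_adjust_test_data; infer_instance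

-- ===== CLAIM (what is proved, stated in full; the proofs are below) =====
def Claim_equal_adjust_test_data : Prop := ∀ (test_data : List (String × String × String)) (seg_len : Int) (seg_backoff : Int), Dom_adjust_test_data test_data seg_len seg_backoff → Spec_adjust_test_data test_data seg_len seg_backoff (adjust_test_data test_data seg_len seg_backoff)

-- ===== LEMMAS AND PROOFS =====

-- A's dict, written out: its items are the first-seen distinct IDs paired with their groups
theorem items_tmp_data (test_data : List (String × String × String)) :
    (test_data.foldl (fun d e => d.modify e.1 [] (· ++ [(e.2.1, e.2.2)]))
      (PySem.Dict.empty : PySem.Dict String (List (String × String)))).items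
    = (PySem.List.dedup (test_data.map (·.1))).map
        (fun k => (k, (test_data.filter (fun e => e.1 == k)).map (fun e => (e.2.1, e.2.2)))) := by
  have hfold :
      test_data.foldl (fun d e => d.modify e.1 [] (· ++ [(e.2.1, e.2.2)]))
        (PySem.Dict.empty : PySem.Dict String (List (String × String)))
      = (test_data.map (fun e => (e.1, (e.2.1, e.2.2)))).foldl
          (fun d p => d.modify p.1 [] (· ++ [p.2])) PySem.Dict.empty := by
    rw [List.foldl_map]
  rw [hfold]
  set pairs := test_data.map (fun e => (e.1, (e.2.1, e.2.2))) with hpairs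
  set d := pairs.foldl (fun d p => d.modify p.1 [] (· ++ [p.2]))
      (PySem.Dict.empty : PySem.Dict String (List (String × String))) with hd
  have hnodup : d.keys.Nodup :=
    PySem.Dict.nodup_keys_foldl_modify_key pairs Prod.fst [] (fun _ p l => l ++ [p.2]) _
      (by simp [PySem.Dict.keys_empty])
  have hkeys : d.keys = PySem.List.dedup (test_data.map (·.1)) := by
    refine (PySem.Dict.keys_foldl_modify_key pairs Prod.fst [] (fun _ p l => l ++ [p.2])
      PySem.Dict.empty).trans ?_
    simp [hpairs, PySem.Dict.keys_empty, PySem.Set.update_nil_left,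
      PySem.List.dedup_eq_ofList]
  rw [PySem.Dict.items_eq_map_keys d hnodup [], hkeys]
  apply List.map_congr_left
  intro k hk
  congr 1
  refine (PySem.Dict.getD_foldl_modify_append pairs PySem.Dict.empty k).trans ?_
  simp [hpairs, PySem.Dict.getD_empty]

-- ===== VERDICT (by name: the statement is the Claim_ definition above) =====
theorem adjust_test_data_spec : Claim_equal_adjust_test_data := by
  intro test_data seg_len seg_backoff _
  unfold Spec_adjust_test_data adjust_test_data adjust_test_data_alt
  dsimp only
  rw [items_tmp_data, PySem.List.foldl_append_eq_flatMap, List.flatMap_map]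
  simp
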